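-- pv_equiv track=rewrite | github.com/Vishal-HaCkEr1910/Automation-scripts-for-bug-bounty | xss_Automation_tool/xss_scanner.py | _script_ctx
-- ===== SOURCE A (Python) =====
-- def _script_ctx(html, pos, marker):
--     before = html[max(0,pos-200):pos]
--     surround = html[max(0,pos-60):pos+len(marker)+60]
--     dq = sum(1 for c in before if c=='"' and (before[max(0,before.index(c)-1)] if before.index(c)>0 else '')!='\\')
--     sq = sum(1 for c in before if c=="'" and (before[max(0,before.index(c)-1)] if before.index(c)>0 else '')!='\\')
--     if dq % 2 == 1: return ('script_dquote', surround)
--     if sq % 2 == 1: return ('script_squote', surround)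
--     return ('script_bare', surround)
-- ===== SOURCE B (Python) =====
-- def _script_ctx(html, pos, marker):
--     before = html[max(0, pos-200):pos]
--     surround = html[max(0, pos-60):pos+len(marker)+60]
--
--     def unescaped(q):
--         n = 0
--         prev = ''
--         for c in before:
--             if c == q and prev != '\\':
--                 n += 1
--             prev = c
--         return n
--
--     if unescaped('"') % 2 == 1:
--         return ('script_dquote', surround)
--     if unescaped("'") % 2 == 1:
--         return ('script_squote', surround)
--     return ('script_bare', surround)
-- ===== Notes on version B (the rewrite author's own statement) =====
-- stated objective: alternative
-- what changed: B counts quotes in the 200-char window in a single pass that tracks the previous character (each quote checked against its own preceding character), instead of A's per-character test via before.index(c), which always inspects the character before the FIRST occurrence of the quote; B fixes that evident bug, and on inputs where the miscount does not flip a parity the results coincide.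
-- intended difference: On inputs whose 200-character window before pos contains a backslash-escaped quote that flips A's first-occurrence-based quote-parity test, A returns the wrong context label (e.g. 'script_bare' where the position is inside a double-quoted string); B, which tests each quote against its own preceding character, returns the intended label. — e.g. on _script_ctx("\"a\\\"", 4, ""): A returns ("script_bare", "\"a\\\""), B returns ("script_dquote", "\"a\\\"")
import Mathlib
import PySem

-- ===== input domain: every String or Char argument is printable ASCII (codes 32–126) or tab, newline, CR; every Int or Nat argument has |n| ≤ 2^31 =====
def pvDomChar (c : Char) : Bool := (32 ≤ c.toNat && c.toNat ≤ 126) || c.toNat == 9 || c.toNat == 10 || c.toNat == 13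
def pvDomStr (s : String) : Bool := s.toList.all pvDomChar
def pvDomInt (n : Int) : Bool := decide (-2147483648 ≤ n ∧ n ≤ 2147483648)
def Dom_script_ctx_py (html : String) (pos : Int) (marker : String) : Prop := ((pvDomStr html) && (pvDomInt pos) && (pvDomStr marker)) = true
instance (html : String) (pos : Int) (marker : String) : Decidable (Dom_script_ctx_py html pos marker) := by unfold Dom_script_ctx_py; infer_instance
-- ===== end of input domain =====

-- B replaces A's first-occurrence-based escape test (before.index(c)) by a one-pass scan that
-- checks each quote against its own preceding character; outside D_ (where the miscount flips a
-- parity) the two agree, inside D_ B returns the intended context label.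


-- ===== PORT A =====
-- before = html[max(0,pos-200):pos], as its character list (both ports' generators run over it)
def pvBeforeL (html : String) (pos : Int) : List Char :=
  (PySem.Str.slice html (some (max 0 (pos - 200))) (some pos)).toList

-- A's escape test for a character c of `before`: it uses before.index(c), the FIRST occurrence.
-- (Python's `'' != '\\'` in the index==0 branch is literally True.)
def pvCondA (l : List Char) (c : Char) : Bool :=
  let i : Int := ((PySem.List.index? l c).getD 0 : Nat)
  if 0 < i then PySem.List.pyGetD l (max 0 (i - 1)) ' ' != '\\' else true
  -- `before.index(c)` cannot raise here: c is drawn from `before`; getD 0 is unreachable padding.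
  -- `before[max(0, i-1)]` is always in range when 0 < i, so pyGetD's default ' ' is unreachable.

def script_ctx_py (html : String) (pos : Int) (marker : String) : String × String :=
  let before := pvBeforeL html pos
  let surround := PySem.Str.slice html (some (max 0 (pos - 60))) (some (pos + PySem.Str.len marker + 60))
  let dq : Int := before.foldl (fun acc c => if c == '"' && pvCondA before c then acc + 1 else acc) 0
  let sq : Int := before.foldl (fun acc c => if c == '\'' && pvCondA before c then acc + 1 else acc) 0
  if PySem.Int.mod dq 2 == 1 then ("script_dquote", surround)
  else if PySem.Int.mod sq 2 == 1 then ("script_squote", surround)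
  else ("script_bare", surround)

-- ===== PORT B =====
-- one step of B's scan: state = (count so far, previous character; none plays Python's initial '')
def pvStepB (q : Char) (st : Int × Option Char) (c : Char) : Int × Option Char :=
  (if c == q && st.2 != some '\\' then st.1 + 1 else st.1, some c)

def script_ctx_py_alt (html : String) (pos : Int) (marker : String) : String × String :=
  let before := pvBeforeL html pos
  let surround := PySem.Str.slice html (some (max 0 (pos - 60))) (some (pos + PySem.Str.len marker + 60))
  let unescaped := fun (q : Char) => (before.foldl (pvStepB q) (0, none)).1
  if PySem.Int.mod (unescaped '"') 2 == 1 then ("script_dquote", surround)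
  else if PySem.Int.mod (unescaped '\'') 2 == 1 then ("script_squote", surround)
  else ("script_bare", surround)

-- ===== PRECONDITION & SPEC =====
-- the intended count: occurrences of q in w not immediately preceded by a backslash
def pvBV (q : Char) (w : List Char) : Nat := w.count q - (w.zip w.tail).count ('\\', q)

-- quote-parity mismatch: A reads the count of q as 0 when the FIRST occurrence of q is escaped
def pvBadQ (q : Char) (w : List Char) : Prop :=
  (if (PySem.List.index? w q).any (fun i => w[i - 1]? == some '\\') then 0 else w.count q) % 2
    ≠ pvBV q w % 2

def pvBad (w : List Char) : Prop := pvBadQ '"' w ∨ (pvBV '"' w % 2 = 0 ∧ pvBadQ '\'' w)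

-- On inputs whose 200-character window before pos contains a backslash-escaped quote that flips A's
-- first-occurrence-based quote-parity test, A returns the wrong context label (e.g. 'script_bare'
-- inside a double-quoted string); B, testing each quote against its own preceding character,
-- returns the intended label.
def D_script_ctx_py (html : String) (pos : Int) (marker : String) : Prop :=
  pvBad (pvBeforeL html pos)
instance (html : String) (pos : Int) (marker : String) : Decidable (D_script_ctx_py html pos marker) := by
  unfold D_script_ctx_py pvBad pvBadQ; infer_instance

def Spec_script_ctx_py (html : String) (pos : Int) (marker : String) (out : String × String) : Prop :=
  ¬ D_script_ctx_py html pos marker → out = script_ctx_py_alt html pos marker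
instance (html : String) (pos : Int) (marker : String) (out : String × String) : Decidable (Spec_script_ctx_py html pos marker out) := by
  unfold Spec_script_ctx_py; infer_instance

def pvDiffWitness_script_ctx_py : String × Int × String := ("\"a\\\"", 4, "")
def pvDiffWitnessOut_script_ctx_py : (String × String) × (String × String) :=
  (("script_bare", "\"a\\\""), ("script_dquote", "\"a\\\""))

-- ===== CLAIM (what is proved, stated in full; the proofs are below) =====
def Claim_unchanged_script_ctx_py : Prop := ∀ (html : String) (pos : Int) (marker : String), Dom_script_ctx_py html pos marker → Spec_script_ctx_py html pos marker (script_ctx_py html pos marker)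
def Claim_changed_script_ctx_py : Prop := Dom_script_ctx_py (pvDiffWitness_script_ctx_py.1) (pvDiffWitness_script_ctx_py.2.1) (pvDiffWitness_script_ctx_py.2.2) ∧ D_script_ctx_py (pvDiffWitness_script_ctx_py.1) (pvDiffWitness_script_ctx_py.2.1) (pvDiffWitness_script_ctx_py.2.2) ∧ script_ctx_py (pvDiffWitness_script_ctx_py.1) (pvDiffWitness_script_ctx_py.2.1) (pvDiffWitness_script_ctx_py.2.2) = pvDiffWitnessOut_script_ctx_py.1 ∧ script_ctx_py_alt (pvDiffWitness_script_ctx_py.1) (pvDiffWitness_script_ctx_py.2.1) (pvDiffWitness_script_ctx_py.2.2) = pvDiffWitnessOut_script_ctx_py.2 ∧ pvDiffWitnessOut_script_ctx_py.1 ≠ pvDiffWitnessOut_script_ctx_py.2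
def Claim_exact_script_ctx_py : Prop := ∀ (html : String) (pos : Int) (marker : String), Dom_script_ctx_py html pos marker → D_script_ctx_py html pos marker → script_ctx_py html pos marker ≠ script_ctx_py_alt html pos marker

-- ===== LEMMAS AND PROOFS =====

-- the count A's parity test effectively uses (a proof name for pvBadQ's left-hand side)
def pvAV (q : Char) (w : List Char) : Nat :=
  if (PySem.List.index? w q).any (fun i => w[i - 1]? == some '\\') then 0 else w.count q

theorem pvBadQ_eq (q : Char) (w : List Char) : pvBadQ q w ↔ pvAV q w % 2 ≠ pvBV q w % 2 := Iff.rfl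

def pvLabel (d s : Bool) : String :=
  if d then "script_dquote" else if s then "script_squote" else "script_bare"

-- occurrences of q not preceded by a backslash, scanned with the previous character (proof helper)
def pvCountU (q : Char) : Option Char → List Char → Nat
  | _, [] => 0
  | prev, c :: cs => (if c = q ∧ prev ≠ some '\\' then 1 else 0) + pvCountU q (some c) cs

-- countP of "c = q and P c" over any list collapses to a single test of P q
theorem countP_eq_ite_count (q : Char) (f : Char → Bool) (m : List Char) :
    m.countP (fun c => c == q && f c) = if f q then m.count q else 0 := by
  induction m with
  | nil => simp
  | cons c cs ih =>
    by_cases hc : c = q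
    · subst hc
      by_cases hf : f c <;> simp [List.countP_cons, List.count_cons, hf, ih]
    · simp [List.countP_cons, List.count_cons, hc, ih, Ne.symm hc]

-- the value A's parity test uses, expressed through D_'s pvAV (q is a quote, never the backslash)
theorem countA_eq (q : Char) (l : List Char) (hq : q ≠ '\\') :
    (if pvCondA l q then l.count q else 0) = pvAV q l := by
  by_cases hmem : q ∈ l
  · obtain ⟨i, h⟩ := Option.isSome_iff_exists.mp ((PySem.List.index?_isSome_iff l q).mpr hmem)
    obtain ⟨hk, hget, -⟩ := PySem.List.getElem_of_index?_eq_some h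
    rw [PySem.List.index?_eq_idxOf?] at h
    rcases Nat.eq_zero_or_pos i with hi | hi
    · subst hi
      simp [pvCondA, pvAV, h, List.getElem?_eq_getElem hk, hget, hq]
    · have h1 : i - 1 < l.length := by omega
      have hmax : max 0 ((i : Int) - 1) = ((i - 1 : Nat) : Int) := by omega
      have hgd : PySem.List.pyGetD l (max 0 ((i : Int) - 1)) ' ' = l[i - 1] := by
        rw [hmax, PySem.List.pyGetD_natCast]; simp [List.getD, h1]
      have hi' : (¬ (i : Int) ≤ 0) := by omega
      by_cases hb : l[i - 1] = '\\'
      · simp [pvCondA, pvAV, h, hgd, hb, hi, hi', Nat.pos_iff_ne_zero.mp hi, List.getElem?_eq_getElem h1]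
      · simp [pvCondA, pvAV, h, hgd, hb, hi, hi', List.getElem?_eq_getElem h1, bne]
  · have hc : l.count q = 0 := List.count_eq_zero.mpr hmem
    simp [pvAV, hc]

-- B's fold computes pvCountU
theorem foldB_eq (q : Char) (m : List Char) : ∀ (prev : Option Char) (a : Int),
    (m.foldl (pvStepB q) (a, prev)).1 = a + (pvCountU q prev m : Int) := by
  induction m with
  | nil => intro prev a; simp [pvCountU]
  | cons c cs ih =>
    intro prev a
    simp only [List.foldl_cons, pvStepB, pvCountU, ih]
    by_cases hq : c = q
    · by_cases hp : prev = some '\\' <;> simp [hq, hp] <;> omega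
    · simp [hq]

-- counting the pair ('\\', q) is the countP of its two component tests
theorem count_pair (q : Char) (l : List (Char × Char)) :
    l.count ('\\', q) = l.countP fun p => p.1 == '\\' && p.2 == q := by
  induction l with
  | nil => rfl
  | cons p ps ih =>
    cases p with
    | mk a b =>
      by_cases ha : a = '\\' <;> by_cases hb : b = q <;>
        simp [List.count_cons, List.countP_cons, ih, ha, hb, Prod.ext_iff]

-- escaped occurrences never outnumber occurrences
theorem pvE_le (q : Char) : ∀ (cs : List Char) (c : Char),
    ((c :: cs).zip cs).countP (fun p => p.1 == '\\' && p.2 == q) ≤ cs.count q := by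
  intro cs
  induction cs with
  | nil => intro c; simp
  | cons d ds ih =>
    intro c
    simp only [List.zip_cons_cons, List.countP_cons, List.count_cons]
    have h2 := ih d
    by_cases hd : d = q
    · subst hd
      by_cases hc : c = '\\' <;> simp [hc] <;> omega
    · by_cases hc : c = '\\' <;> simp [hd, Ne.symm hd, hc] <;> omega

theorem countU_some (q : Char) : ∀ (cs : List Char) (c : Char),
    pvCountU q (some c) cs = cs.count q - ((c :: cs).zip cs).countP (fun p => p.1 == '\\' && p.2 == q) := by
  intro cs
  induction cs with
  | nil => intro c; simp [pvCountU]
  | cons d ds ih =>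
    intro c
    simp only [pvCountU, List.zip_cons_cons, List.countP_cons, List.count_cons, ih d]
    have hle := pvE_le q ds d
    by_cases hd : d = q
    · subst hd
      by_cases hc : c = '\\' <;> simp [hc] <;> omega
    · by_cases hc : c = '\\' <;> simp [hd, Ne.symm hd, hc] <;> omega

-- B's scan from the start computes D_'s pvBV
theorem countU_none (q : Char) (w : List Char) : pvCountU q none w = pvBV q w := by
  cases w with
  | nil => simp [pvCountU, pvBV]
  | cons c cs =>
    have hle := pvE_le q cs c
    simp only [pvCountU, countU_some, pvBV, count_pair, List.tail_cons, List.count_cons]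
    by_cases hc : c = q
    · subst hc
      simp; omega
    · simp [hc, Ne.symm hc]

theorem portA_eq (html : String) (pos : Int) (marker : String) :
    script_ctx_py html pos marker =
      (pvLabel (pvAV '"' (pvBeforeL html pos) % 2 == 1) (pvAV '\'' (pvBeforeL html pos) % 2 == 1),
       PySem.Str.slice html (some (max 0 (pos - 60))) (some (pos + PySem.Str.len marker + 60))) := by
  simp only [script_ctx_py, pvLabel]
  have key : ∀ q : Char, q ≠ '\\' →
      (pvBeforeL html pos).foldl
          (fun acc c => if c == q && pvCondA (pvBeforeL html pos) c then acc + 1 else acc) (0 : Int)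
        = (pvAV q (pvBeforeL html pos) : Int) := by
    intro q hq
    rw [PySem.List.foldl_if_add_one, countP_eq_ite_count q (pvCondA (pvBeforeL html pos)),
        countA_eq q (pvBeforeL html pos) hq, zero_add]
  rw [key '"' (by decide), key '\'' (by decide)]
  have hm : ∀ n : Nat, PySem.Int.mod (n : Int) 2 = ((n % 2 : Nat) : Int) := fun n =>
    PySem.Int.mod_natCast n 2
  rw [hm, hm]
  rcases Nat.mod_two_eq_zero_or_one (pvAV '"' (pvBeforeL html pos)) with h1 | h1 <;>
  rcases Nat.mod_two_eq_zero_or_one (pvAV '\'' (pvBeforeL html pos)) with h2 | h2 <;>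
  simp [h1, h2]

theorem portB_eq (html : String) (pos : Int) (marker : String) :
    script_ctx_py_alt html pos marker =
      (pvLabel (pvBV '"' (pvBeforeL html pos) % 2 == 1) (pvBV '\'' (pvBeforeL html pos) % 2 == 1),
       PySem.Str.slice html (some (max 0 (pos - 60))) (some (pos + PySem.Str.len marker + 60))) := by
  simp only [script_ctx_py_alt, pvLabel]
  simp only [foldB_eq '"' (pvBeforeL html pos) none 0, foldB_eq '\'' (pvBeforeL html pos) none 0,
    countU_none, zero_add]
  have hm : ∀ n : Nat, PySem.Int.mod ((n : Nat) : Int) 2 = ((n % 2 : Nat) : Int) := fun n =>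
    PySem.Int.mod_natCast n 2
  simp only [hm]
  rcases Nat.mod_two_eq_zero_or_one (pvBV '"' (pvBeforeL html pos)) with h1 | h1 <;>
  rcases Nat.mod_two_eq_zero_or_one (pvBV '\'' (pvBeforeL html pos)) with h2 | h2 <;>
  simp [h1, h2]

-- ===== VERDICT (by name: the statement is the Claim_ definition above) =====
theorem script_ctx_py_spec : Claim_unchanged_script_ctx_py := by
  intro html pos marker _ hnd
  rw [portA_eq, portB_eq]
  unfold D_script_ctx_py pvBad at hnd
  simp only [pvBadQ_eq] at hnd
  push_neg at hnd
  obtain ⟨h1, h2⟩ := hnd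
  rcases Nat.mod_two_eq_zero_or_one (pvAV '"' (pvBeforeL html pos)) with a1 | a1 <;>
  rcases Nat.mod_two_eq_zero_or_one (pvBV '"' (pvBeforeL html pos)) with b1 | b1 <;>
  rcases Nat.mod_two_eq_zero_or_one (pvAV '\'' (pvBeforeL html pos)) with a2 | a2 <;>
  rcases Nat.mod_two_eq_zero_or_one (pvBV '\'' (pvBeforeL html pos)) with b2 | b2 <;>
    first
    | (exfalso; omega)
    | simp [pvLabel, a1, a2, b1, b2]
    | (exfalso; have := h2 (by omega); omega)

theorem script_ctx_py_changed : Claim_changed_script_ctx_py := by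
  unfold Claim_changed_script_ctx_py; decide

theorem script_ctx_py_tight : Claim_exact_script_ctx_py := by
  intro html pos marker _ hd
  rw [portA_eq, portB_eq]
  intro heq
  have hl := congrArg Prod.fst heq
  unfold D_script_ctx_py pvBad at hd
  simp only [pvBadQ_eq] at hd
  rcases Nat.mod_two_eq_zero_or_one (pvAV '"' (pvBeforeL html pos)) with a1 | a1 <;>
  rcases Nat.mod_two_eq_zero_or_one (pvBV '"' (pvBeforeL html pos)) with b1 | b1 <;>
  rcases Nat.mod_two_eq_zero_or_one (pvAV '\'' (pvBeforeL html pos)) with a2 | a2 <;>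
  rcases Nat.mod_two_eq_zero_or_one (pvBV '\'' (pvBeforeL html pos)) with b2 | b2 <;>
    simp [pvLabel, a1, a2, b1, b2] at hl hd <;> omega
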